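-- pv_equiv track=rewrite | github.com/opestro/odoo-17-single-node-vps | addons/dz_accounting/models/account_report_config.py | string_domain_to_list
-- ===== SOURCE A (Python) =====
-- def string_domain_to_list(domain):
--     domain = domain.replace(" ", "")
--     domain = domain.replace("'", "")
--     domain = domain.replace("(", "")
--     domain = domain.replace(")", "")
--     domain = domain.replace("\n", "")
--     domain = domain.replace("[", "")
--     domain = domain.replace("]", "")
--     domain = domain.split(',')
--     for d in domain:
--         d = d.strip()
--     return domain
-- ===== SOURCE B (Python) =====
-- def string_domain_to_list(domain):
--     # Single left-to-right pass: drop noise characters, split tokens at commas.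
--     tokens = []
--     buf = []
--     for ch in domain:
--         if ch in " '()\n[]":
--             continue
--         if ch == ',':
--             tokens.append(''.join(buf))
--             buf = []
--         else:
--             buf.append(ch)
--     tokens.append(''.join(buf))
--     return tokens
-- ===== Notes on version B (the rewrite author's own statement) =====
-- stated objective: alternative
-- what changed: Replaces seven full-string replace passes followed by a comma split (eight traversals, seven intermediate strings) by one explicit left-to-right pass that skips the noise characters and starts a new token at each comma; same asymptotic cost, different traversal structure.
import Mathlib
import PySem

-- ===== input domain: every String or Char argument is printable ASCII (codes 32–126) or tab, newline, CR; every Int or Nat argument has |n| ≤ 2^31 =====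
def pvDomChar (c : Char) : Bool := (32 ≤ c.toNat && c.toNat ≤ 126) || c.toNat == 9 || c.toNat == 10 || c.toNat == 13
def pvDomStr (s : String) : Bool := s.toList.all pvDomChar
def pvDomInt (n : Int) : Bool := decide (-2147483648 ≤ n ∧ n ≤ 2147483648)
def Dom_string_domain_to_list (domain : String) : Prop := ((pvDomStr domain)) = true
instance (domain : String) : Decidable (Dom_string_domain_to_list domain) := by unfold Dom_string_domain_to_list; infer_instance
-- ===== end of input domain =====

-- B replaces A's seven .replace() passes + .split(',') by one explicit pass over the
-- characters (alternative decomposition, same asymptotic cost).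


-- ===== PORT A =====
-- (the Python 'for d in domain: d = d.strip()' loop rebinds a local and has no effect; omitted)
def string_domain_to_list (domain : String) : List String :=
  let d1 := PySem.Str.replace domain " " ""
  let d2 := PySem.Str.replace d1 "'" ""
  let d3 := PySem.Str.replace d2 "(" ""
  let d4 := PySem.Str.replace d3 ")" ""
  let d5 := PySem.Str.replace d4 "\n" ""
  let d6 := PySem.Str.replace d5 "[" ""
  let d7 := PySem.Str.replace d6 "]" ""
  (PySem.Str.split? d7 ",").getD []   -- sep "," is non-empty, so split? is always some

-- ===== PORT B =====
def sdlNoise (c : Char) : Bool := c = ' ' || c = '\'' || c = '(' || c = ')' || c = '\n' || c = '[' || c = ']'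

def sdlGo : List Char → List Char → List String
  | [], cur => [String.ofList cur]
  | c :: rest, cur =>
    if sdlNoise c then sdlGo rest cur
    else if c = ',' then String.ofList cur :: sdlGo rest []
    else sdlGo rest (cur ++ [c])

def string_domain_to_list_alt (domain : String) : List String :=
  sdlGo domain.toList []

-- ===== PRECONDITION & SPEC =====
def Spec_string_domain_to_list (domain : String) (out : List String) : Prop := out = string_domain_to_list_alt domain
instance (domain : String) (out : List String) : Decidable (Spec_string_domain_to_list domain out) := by unfold Spec_string_domain_to_list; infer_instance

-- ===== CLAIM (what is proved, stated in full; the proofs are below) =====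
def Claim_equal_string_domain_to_list : Prop := ∀ (domain : String), Dom_string_domain_to_list domain → Spec_string_domain_to_list domain (string_domain_to_list domain)

-- ===== LEMMAS AND PROOFS =====

-- Chars-level model of the comma tokenizer (current token kept in order).
def sdlTok : List Char → List Char → List (List Char)
  | [], cur => [cur]
  | c :: rest, cur =>
    if c = ',' then cur :: sdlTok rest []
    else sdlTok rest (cur ++ [c])

-- replacing one character by "" is filtering it out
theorem replace_go_single (c : Char) :
    ∀ (fuel : Nat) (l acc : List Char), l.length ≤ fuel →
      PySem.Chars.replace.go [c] [] fuel l acc =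
        acc.reverse ++ l.filter (fun x => x ≠ c) := by
  intro fuel
  induction fuel with
  | zero =>
    intro l acc h
    have : l = [] := List.length_eq_zero_iff.mp (Nat.le_zero.mp h)
    subst this
    simp [PySem.Chars.replace.go]
  | succ n ih =>
    intro l acc h
    cases l with
    | nil => simp [PySem.Chars.replace.go]
    | cons x t =>
      simp only [PySem.Chars.replace.go]
      by_cases hx : x = c
      · subst hx
        have hp : List.isPrefixOf [x] (x :: t) = true := by
          simp [List.isPrefixOf]
        rw [if_pos hp]
        have e1 : List.drop [x].length (x :: t) = t := rfl
        have e2 : ([] : List Char).reverse ++ acc = acc := rfl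
        rw [e1, e2]
        simp only [List.length_cons] at h
        rw [ih t acc (by omega)]
        simp [List.filter]
      · have hp : List.isPrefixOf [c] (x :: t) = false := by
          simp [List.isPrefixOf]; exact fun h => absurd h.symm hx
        rw [hp]
        simp only [List.length_cons] at h
        rw [ih t _ (by omega)]
        simp [List.filter, hx]

theorem replace_single (c : Char) (s : List Char) :
    PySem.Chars.replace s [c] [] = s.filter (fun x => x ≠ c) := by
  rw [PySem.Chars.replace]
  simp only [List.isEmpty_cons, Bool.false_eq_true, if_false]
  exact replace_go_single c s.length s [] le_rfl

-- splitOn by "," computed by the tokenizer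
theorem splitOn_go_comma :
    ∀ (fuel : Nat) (l cur : List Char) (acc : List (List Char)), l.length < fuel →
      PySem.Chars.splitOn.go [','] fuel l cur acc =
        acc.reverse ++ sdlTok l cur.reverse := by
  intro fuel
  induction fuel with
  | zero => intro l cur acc h; omega
  | succ n ih =>
    intro l cur acc h
    cases l with
    | nil => simp [PySem.Chars.splitOn.go, sdlTok]
    | cons x t =>
      simp only [PySem.Chars.splitOn.go]
      by_cases hx : x = ','
      · subst hx
        have hp : List.isPrefixOf [','] (',' :: t) = true := by
          simp [List.isPrefixOf]
        rw [if_pos hp]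
        have e1 : List.drop [','].length (',' :: t) = t := rfl
        rw [e1]
        simp only [List.length_cons] at h
        rw [ih t [] (cur.reverse :: acc) (by omega)]
        simp [sdlTok]
      · have hp : List.isPrefixOf [','] (x :: t) = false := by
          simp [List.isPrefixOf]; exact fun h => absurd h.symm hx
        rw [hp]
        simp only [List.length_cons] at h
        rw [ih t (x :: cur) acc (by omega)]
        simp [sdlTok, hx]

theorem splitOn_comma (s : List Char) :
    PySem.Chars.splitOn s [','] = sdlTok s [] := by
  rw [PySem.Chars.splitOn]
  rw [splitOn_go_comma (s.length + 1) s [] [] (by omega)]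
  simp

-- B's pass = tokenize the noise-filtered characters, rendered as strings
theorem sdlGo_eq_tok (l : List Char) :
    ∀ cur, sdlGo l cur = (sdlTok (l.filter (fun c => ¬ sdlNoise c)) cur).map String.ofList := by
  induction l with
  | nil => intro cur; simp [sdlGo, sdlTok]
  | cons c rest ih =>
    intro cur
    by_cases hn : sdlNoise c
    · simp [sdlGo, hn, List.filter, ih]
    · by_cases hc : c = ','
      · subst hc
        simp only [sdlGo, hn, List.filter]
        simp [sdlTok, ih]
      · simp only [sdlGo, hn, List.filter]
        simp [sdlTok, hc, ih]

-- the seven replace-filters equal the noise filter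
theorem seven_filters (l : List Char) :
    ((((((l.filter (fun x => x ≠ ' ')).filter (fun x => x ≠ '\'')).filter
        (fun x => x ≠ '(')).filter (fun x => x ≠ ')')).filter
        (fun x => x ≠ '\n')).filter (fun x => x ≠ '[')).filter (fun x => x ≠ ']') =
      l.filter (fun c => ¬ sdlNoise c) := by
  simp only [List.filter_filter]
  apply List.filter_congr
  intro c _
  simp [sdlNoise]
  cases Decidable.em (c = ' ') <;> cases Decidable.em (c = '\'') <;>
    cases Decidable.em (c = '(') <;> cases Decidable.em (c = ')') <;>
    cases Decidable.em (c = '\n') <;> cases Decidable.em (c = '[') <;>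
    cases Decidable.em (c = ']') <;> simp_all

theorem replace_single_str (s : String) (c : Char) (o : String) (ho : o.toList = [c]) :
    (PySem.Str.replace s o "").toList = s.toList.filter (fun x => x ≠ c) := by
  rw [PySem.Str.toList_replace, ho, show ("" : String).toList = ([] : List Char) from rfl,
    replace_single]

-- ===== VERDICT (by name: the statement is the Claim_ definition above) =====
theorem string_domain_to_list_spec : Claim_equal_string_domain_to_list := by
  intro domain _
  unfold Spec_string_domain_to_list string_domain_to_list string_domain_to_list_alt
  simp only [PySem.Str.split?, PySem.Chars.split?,
    show ("," : String).toList = [','] from rfl, List.isEmpty_cons, Bool.false_eq_true,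
    if_false, Option.map_some, Option.getD_some]
  rw [replace_single_str _ ']' _ rfl, replace_single_str _ '[' _ rfl,
    replace_single_str _ '\n' _ rfl, replace_single_str _ ')' _ rfl,
    replace_single_str _ '(' _ rfl, replace_single_str _ '\'' _ rfl,
    replace_single_str _ ' ' _ rfl, seven_filters, splitOn_comma, sdlGo_eq_tok]
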